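-- pv_equiv track=rewrite | github.com/lougithubpublic/CryptoDeepTools | 05VulnerableOpenSSL/buildProgs.py | has_non_zero_after_zero
-- ===== SOURCE A (Python) =====
-- def has_non_zero_after_zero(arr):
--     found_zero = False
--     for num in arr:
--         if found_zero and num != 0:
--             return True
--         if num == 0:
--             found_zero = True
--     return False
-- ===== SOURCE B (Python) =====
-- def has_non_zero_after_zero(arr):
--     a = list(arr)
--     if 0 not in a:
--         return False
--     first_zero = a.index(0)
--     last_nonzero = max((i for i, x in enumerate(a) if x != 0), default=-1)
--     return last_nonzero > first_zero
-- ===== Notes on version B (the rewrite author's own statement) =====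
-- stated objective: alternative
-- what changed: Instead of A's stateful forward scan with a found_zero flag, B computes two independent positions - the index of the first zero and the maximal index of a non-zero element - and returns whether the latter exceeds the former.
import Mathlib
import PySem

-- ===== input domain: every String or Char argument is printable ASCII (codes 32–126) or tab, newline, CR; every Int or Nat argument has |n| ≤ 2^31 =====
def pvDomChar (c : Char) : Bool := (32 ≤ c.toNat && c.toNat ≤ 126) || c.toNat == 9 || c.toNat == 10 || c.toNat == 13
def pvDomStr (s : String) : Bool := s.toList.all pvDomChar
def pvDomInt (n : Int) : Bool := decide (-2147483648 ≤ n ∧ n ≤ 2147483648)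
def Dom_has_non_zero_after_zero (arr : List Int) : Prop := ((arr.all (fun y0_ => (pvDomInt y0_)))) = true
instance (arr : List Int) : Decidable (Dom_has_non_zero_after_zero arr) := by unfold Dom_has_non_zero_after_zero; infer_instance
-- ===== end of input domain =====

-- B: instead of A's stateful forward scan with a found_zero flag, compare two independent
-- positions (first-zero index vs maximal non-zero index); alternative algorithm, same O(n) cost.
-- ===== PORT A =====
-- loop over arr carrying the found_zero flag, branches in A's order
def hnzazLoop (arr : List Int) (found_zero : Bool) : Bool :=
  match arr with
  | [] => false
  | num :: rest =>
    if found_zero && num != 0 then true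
    else hnzazLoop rest (if num == 0 then true else found_zero)

def has_non_zero_after_zero (arr : List Int) : Bool := hnzazLoop arr false

-- ===== PORT B =====
def has_non_zero_after_zero_alt (arr : List Int) : Bool :=
  if !(arr.contains 0) then false                     -- if 0 not in a: return False
  else
    match PySem.List.index? arr 0 with                -- first_zero = a.index(0)
    | none => false                                   -- unreachable: 0 ∈ arr here
    | some first_zero =>
      -- last_nonzero = max((i for i, x in enumerate(a) if x != 0), default=-1)
      let last_nonzero : Int :=
        PySem.List.maxD
          (((PySem.List.enumerate arr).filter (fun p => p.2 != 0)).map (fun p => p.1))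
          (fun i => i) (-1)
      decide (last_nonzero > (first_zero : Int))      -- return last_nonzero > first_zero

-- ===== PRECONDITION & SPEC =====
def Spec_has_non_zero_after_zero (arr : List Int) (out : Bool) : Prop := out = has_non_zero_after_zero_alt arr
instance (arr : List Int) (out : Bool) : Decidable (Spec_has_non_zero_after_zero arr out) := by unfold Spec_has_non_zero_after_zero; infer_instance

-- ===== CLAIM (what is proved, stated in full; the proofs are below) =====
def Claim_equal_has_non_zero_after_zero : Prop := ∀ (arr : List Int), Dom_has_non_zero_after_zero arr → Spec_has_non_zero_after_zero arr (has_non_zero_after_zero arr)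

-- ===== LEMMAS AND PROOFS =====

-- after a zero has been seen, A's loop is just 'any non-zero'
theorem hnzazLoop_true (arr : List Int) : hnzazLoop arr true = arr.any (fun x => x != 0) := by
  induction arr with
  | nil => rfl
  | cons n t ih =>
    simp only [hnzazLoop, List.any_cons]
    by_cases h : n = 0 <;> simp [h, ih]

-- no zero in arr → A returns false
theorem hnzazLoop_none (arr : List Int) (h : (0:Int) ∉ arr) : hnzazLoop arr false = false := by
  induction arr with
  | nil => rfl
  | cons n t ih =>
    have hn : n ≠ 0 := fun hn => h (hn ▸ List.mem_cons_self)
    have ht : (0:Int) ∉ t := fun hm => h (List.mem_cons_of_mem _ hm)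
    simp [hnzazLoop, hn, ih ht]

-- first zero at index k → A returns 'any non-zero after index k'
theorem hnzazLoop_some (arr : List Int) (k : Nat) (h : PySem.List.index? arr 0 = some k) :
    hnzazLoop arr false = (arr.drop (k+1)).any (fun x => x != 0) := by
  induction arr generalizing k with
  | nil => simp [PySem.List.index?] at h
  | cons n t ih =>
    by_cases hn : n = 0
    · subst hn
      rw [PySem.List.index?_cons_self] at h
      obtain rfl : (0:Nat) = k := Option.some.inj h
      simp [hnzazLoop, hnzazLoop_true]
    · rw [PySem.List.index?_cons_of_ne t hn] at h
      obtain ⟨k', hk', rfl⟩ := Option.map_eq_some_iff.mp h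
      have hb : (n == 0) = false := by simp [hn]
      have hb2 : (n != 0) = true := by simp [hn]
      simp only [hnzazLoop, hb, hb2, Bool.false_and]
      simpa using ih k' hk'

-- running max starting at -1 exceeds b (with -1 ≤ b) iff some element does
theorem foldl_max_gt_iff (l : List Int) (b : Int) (hb : -1 ≤ b) :
    l.foldl max (-1) > b ↔ ∃ y ∈ l, b < y := by
  constructor
  · intro hgt
    rcases PySem.List.foldl_max_mem l (-1) with heq | hmem
    · omega
    · exact ⟨_, hmem, hgt⟩
  · rintro ⟨y, hy, hby⟩
    have := (PySem.List.le_foldl_max l (-1)).2 y hy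
    omega

-- max(default=-1) over a list of values ≥ -1 is the running max from -1
theorem maxD_id_eq_foldl (l : List Int) (h : ∀ x ∈ l, -1 ≤ x) :
    PySem.List.maxD l (fun i => i) (-1) = l.foldl max (-1) := by
  cases l with
  | nil => rfl
  | cons x t =>
    have hx : -1 ≤ x := h x List.mem_cons_self
    unfold PySem.List.maxD
    rw [PySem.List.max?_id_cons]
    simp [List.foldl_cons, max_eq_right hx]

-- indices appearing in B's candidate list are exactly the non-zero positions
theorem mem_idx_iff (arr : List Int) (y : Int) :
    y ∈ (((PySem.List.enumerate arr).filter (fun p => p.2 != 0)).map (fun p => p.1)) ↔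
      ∃ (j : Nat) (hj : j < arr.length), (y = (j : Int) ∧ arr[j] ≠ 0) := by
  simp only [List.mem_map, List.mem_filter]
  constructor
  · rintro ⟨⟨i, v⟩, ⟨hmem, hv⟩, rfl⟩
    rcases (PySem.List.mem_enumerate_iff arr 0 (i,v)).mp hmem with ⟨j, hj, hpe⟩
    obtain ⟨h1, h2⟩ := Prod.mk.injEq .. ▸ hpe
    refine ⟨j, hj, by simpa using h1, ?_⟩
    simp only [h2] at hv; simpa using hv
  · rintro ⟨j, hj, rfl, hnz⟩
    exact ⟨((j : Int), arr[j]), ⟨(PySem.List.mem_enumerate_iff arr 0 _).mpr ⟨j, hj, by simp⟩, by simpa using hnz⟩, rfl⟩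

-- 'any non-zero in drop (k+1)' as an existential over indices
theorem any_drop_iff (arr : List Int) (k : Nat) :
    ((arr.drop (k+1)).any (fun x => x != 0) = true) ↔
      ∃ (j : Nat) (hj : j < arr.length), (k < j ∧ arr[j] ≠ 0) := by
  rw [List.any_eq_true]
  constructor
  · rintro ⟨x, hx, hnz⟩
    rcases List.mem_iff_getElem.mp hx with ⟨i, hi, rfl⟩
    rw [List.getElem_drop] at *
    have hlen : k + 1 + i < arr.length := by
      have := List.length_drop (l := arr) (i := k+1) ▸ hi; omega
    exact ⟨k + 1 + i, hlen, by omega, by simpa using hnz⟩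
  · rintro ⟨j, hj, hk, hnz⟩
    have hi : j - (k+1) < (arr.drop (k+1)).length := by
      rw [List.length_drop]; omega
    refine ⟨(arr.drop (k+1))[j - (k+1)], List.getElem_mem hi, ?_⟩
    rw [List.getElem_drop]
    have : k + 1 + (j - (k+1)) = j := by omega
    simpa [this] using hnz

theorem ab_eq (arr : List Int) : has_non_zero_after_zero arr = has_non_zero_after_zero_alt arr := by
  unfold has_non_zero_after_zero has_non_zero_after_zero_alt
  by_cases hmem : (0:Int) ∈ arr
  · have hc : arr.contains 0 = true := by simpa using hmem
    rcases Option.isSome_iff_exists.mp ((PySem.List.index?_isSome_iff arr 0).mpr hmem) with ⟨k, hk⟩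
    rw [hc, hk]
    simp only [Bool.not_true, Bool.false_eq_true, if_false]
    rw [hnzazLoop_some arr k hk]
    set l := (((PySem.List.enumerate arr).filter (fun p => p.2 != 0)).map (fun p => p.1)) with hl
    have hpos : ∀ x ∈ l, -1 ≤ x := by
      intro x hx
      rcases (mem_idx_iff arr x).mp (hl ▸ hx) with ⟨j, hj, rfl, _⟩
      omega
    rw [Bool.eq_iff_iff, any_drop_iff, decide_eq_true_iff, maxD_id_eq_foldl l hpos,
      foldl_max_gt_iff l (k:Int) (by omega)]
    constructor
    · rintro ⟨j, hj, hk2, hnz⟩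
      exact ⟨(j:Int), (mem_idx_iff arr _).mpr ⟨j, hj, rfl, hnz⟩, by exact_mod_cast hk2⟩
    · rintro ⟨y, hy, hky⟩
      rcases (mem_idx_iff arr y).mp hy with ⟨j, hj, rfl, hnz⟩
      exact ⟨j, hj, by exact_mod_cast hky, hnz⟩
  · have hc : arr.contains 0 = false := by simpa using hmem
    rw [hc, hnzazLoop_none arr hmem]
    rfl

-- ===== VERDICT (by name: the statement is the Claim_ definition above) =====
theorem has_non_zero_after_zero_spec : Claim_equal_has_non_zero_after_zero := by
  intro arr _
  unfold Spec_has_non_zero_after_zero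
  exact ab_eq arr
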